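-- pv_equiv track=rewrite | github.com/oldwall01/Prove-checker | proofchecker.py | nextExp
-- ===== SOURCE A (Python) =====
-- def nextExp(L, i):
-- 	prenCount=0
-- 	if L[i]=='(':
-- 		prenCount+=1
-- 		n=i+1
-- 		while prenCount>0:
-- 			if L[n]=='(': prenCount+=1
-- 			if L[n]==')': prenCount-=1
-- 			n+=1
-- 		return n
-- 	else: return i+1
-- ===== SOURCE B (Python) =====
-- def nextExp(L, i):
--     # Recursive descent over the nested parenthesis structure:
--     # a non-'(' token is a single-token expression; a '(' opens a group that
--     # is skipped by recursively skipping inner expressions until its ')'.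
--     if L[i] != '(':
--         return i + 1
--     n = i + 1
--     while L[n] != ')':
--         n = nextExp(L, n)
--     return n + 1
-- ===== Notes on version B (the rewrite author's own statement) =====
-- stated objective: alternative
-- what changed: Replaces A's flat while-loop with an explicit open-parenthesis counter by recursive descent over the nested structure: each recursive call skips one whole sub-expression, no depth counter is kept.
import Mathlib
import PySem

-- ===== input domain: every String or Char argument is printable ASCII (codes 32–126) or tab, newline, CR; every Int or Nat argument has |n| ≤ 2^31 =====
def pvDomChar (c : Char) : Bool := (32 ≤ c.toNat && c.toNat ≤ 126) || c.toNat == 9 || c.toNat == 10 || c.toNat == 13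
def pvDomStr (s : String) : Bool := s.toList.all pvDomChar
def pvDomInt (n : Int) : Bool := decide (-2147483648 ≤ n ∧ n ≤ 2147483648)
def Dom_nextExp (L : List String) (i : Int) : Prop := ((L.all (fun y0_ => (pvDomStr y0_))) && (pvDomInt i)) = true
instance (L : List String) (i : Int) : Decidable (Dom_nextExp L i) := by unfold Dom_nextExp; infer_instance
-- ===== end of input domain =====

-- B replaces A's flat counter loop by recursive descent over the nested structure (alternative decomposition, same cost).


-- ===== PORT A =====
-- A's while loop: state (prenCount, n); pyGet? none = IndexError (outside Pre_, return 0 there).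
def nextExpLoopA (L : List String) (c : Int) (n : Int) : Int :=
  if 0 < c then
    match h : PySem.List.pyGet? L n with
    | none => 0
    | some s =>
      let c1 := if s = "(" then c + 1 else c
      let c2 := if s = ")" then c1 - 1 else c1
      nextExpLoopA L c2 (n + 1)
  else n
termination_by ((L.length : Int) - n).toNat
decreasing_by
  have hn : n < (L.length : Int) := by
    by_contra hge
    have : PySem.List.pyGet? L n = none := by
      rw [PySem.List.pyGet?_eq_none_iff, PySem.Raise.InRange]; omega
    simp [this] at h
  omega

def nextExp (L : List String) (i : Int) : Int :=
  match PySem.List.pyGet? L i with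
  | none => 0
  | some s =>
    if s = "(" then nextExpLoopA L (0 + 1) (i + 1)
    else i + 1

-- ===== PORT B =====
-- Source B's recursion, made total with a fuel guard (fuel never runs out inside Pre_);
-- goB = Source B's nextExp, loopB = its while loop.
mutual
def nextExpGoB (L : List String) : Nat → Int → Int
  | 0, _ => 0
  | Nat.succ f, i =>
    match PySem.List.pyGet? L i with
    | none => 0
    | some s => if s ≠ "(" then i + 1 else nextExpLoopB L f (i + 1)
def nextExpLoopB (L : List String) : Nat → Int → Int
  | 0, _ => 0
  | Nat.succ f, n =>
    match PySem.List.pyGet? L n with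
    | none => 0
    | some s => if s = ")" then n + 1 else nextExpLoopB L f (nextExpGoB L f n)
end

def nextExp_alt (L : List String) (i : Int) : Int :=
  nextExpGoB L (2 * L.length + 2 * i.natAbs + 8) i

-- ===== PRECONDITION & SPEC =====
-- the window of the k tokens read starting at index n (Python indexing)
def nextExpWindow (L : List String) (n : Int) (k : Nat) : List String :=
  (List.range k).map (fun t => PySem.List.pyGetD L (n + Int.ofNat t) "")

-- Pre_ excludes exactly the inputs where A raises IndexError: i out of range, or L[i] = "(" with no
-- window after i inside the list whose ")" count exceeds its "(" count by one (no matching close);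
-- B raises IndexError there too.
def Pre_nextExp (L : List String) (i : Int) : Prop :=
  PySem.Raise.InRange L.length i ∧
  (PySem.List.pyGetD L i "" = "(" →
    ∃ k < L.length + i.natAbs + 1,
      (i + 1 + (k : Int) < (L.length : Int) ∧
        ((nextExpWindow L (i + 1) (k + 1)).count ")" : Int) =
          (nextExpWindow L (i + 1) (k + 1)).count "(" + 1))
instance (L : List String) (i : Int) : Decidable (Pre_nextExp L i) := by
  unfold Pre_nextExp; infer_instance

def pvWitness_nextExp : List String × Int := (["(", "x", ")"], 0)

def Spec_nextExp (L : List String) (i : Int) (out : Int) : Prop := out = nextExp_alt L i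
instance (L : List String) (i : Int) (out : Int) : Decidable (Spec_nextExp L i out) := by
  unfold Spec_nextExp; infer_instance

-- ===== CLAIM (what is proved, stated in full; the proofs are below) =====
def Claim_equal_nextExp : Prop :=
  ∀ (L : List String) (i : Int), Dom_nextExp L i → Pre_nextExp L i → Spec_nextExp L i (nextExp L i)

-- ===== LEMMAS AND PROOFS =====

-- balance contribution of one token, and the running balance of the k tokens starting at index n
def nextExpContrib (s : String) : Int := if s = "(" then 1 else if s = ")" then -1 else 0
def nextExpBal (L : List String) (n : Int) : Nat → Int
  | 0 => 0
  | Nat.succ k => nextExpContrib (PySem.List.pyGetD L n "") + nextExpBal L (n + 1) k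

theorem nextExpWindow_succ (L : List String) (n : Int) (k : Nat) :
    nextExpWindow L n (k + 1) = PySem.List.pyGetD L n "" :: nextExpWindow L (n + 1) k := by
  unfold nextExpWindow
  rw [List.range_succ_eq_map, List.map_cons, List.map_map]
  congr 1
  · norm_num
  · refine List.map_congr_left (fun t _ => ?_)
    simp only [Function.comp_apply]
    simp only [Int.ofNat_eq_natCast]
    push_cast
    congr 1
    omega

theorem nextExpBal_eq (L : List String) :
    ∀ (k : Nat) (n : Int), nextExpBal L n k =
      ((nextExpWindow L n k).count "(" : Int) - (nextExpWindow L n k).count ")" := by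
  intro k
  induction k with
  | zero => intro n; simp [nextExpBal, nextExpWindow]
  | succ k ih =>
    intro n
    rw [nextExpBal, nextExpWindow_succ, ih]
    simp only [List.count_cons, nextExpContrib]
    split_ifs <;> simp_all <;> omega

-- Option-valued mirror of A's loop, used only in the proofs (none = IndexError).
def nextExpLoopAo (L : List String) (c : Int) (n : Int) : Option Int :=
  if 0 < c then
    match h : PySem.List.pyGet? L n with
    | none => none
    | some s => nextExpLoopAo L (c + nextExpContrib s) (n + 1)
  else some n
termination_by ((L.length : Int) - n).toNat
decreasing_by
  have hn : n < (L.length : Int) := by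
    by_contra hge
    have : PySem.List.pyGet? L n = none := by
      rw [PySem.List.pyGet?_eq_none_iff, PySem.Raise.InRange]; omega
    simp [this] at h
  omega

theorem pyGet?_some_lt (L : List String) (n : Int) (s : String)
    (h : PySem.List.pyGet? L n = some s) : -(L.length : Int) ≤ n ∧ n < (L.length : Int) := by
  by_contra hc
  have : PySem.List.pyGet? L n = none := by
    rw [PySem.List.pyGet?_eq_none_iff, PySem.Raise.InRange]; omega
  simp [this] at h


theorem nextExpLoopAo_eq (L : List String) :
    ∀ (k : Nat) (c n v : Int), ((L.length : Int) - n).toNat ≤ k →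
      nextExpLoopAo L c n = some v → nextExpLoopA L c n = v := by
  intro k
  induction k with
  | zero =>
    intro c n v hk h
    rw [nextExpLoopAo] at h
    split at h
    · split at h
      · exact absurd h (by simp)
      · rename_i hc s hg
        have := pyGet?_some_lt L n s hg
        omega
    · rename_i hc
      rw [nextExpLoopA, if_neg hc]
      exact Option.some.inj h
  | succ k ih =>
    intro c n v hk h
    rw [nextExpLoopAo] at h
    split at h
    · rename_i hc
      split at h
      · exact absurd h (by simp)
      · rename_i s hg
        rw [nextExpLoopA, if_pos hc]
        have hlt := pyGet?_some_lt L n s hg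
        have hcc : (if s = ")" then (if s = "(" then c + 1 else c) - 1 else
                 (if s = "(" then c + 1 else c)) = c + nextExpContrib s := by
          simp only [nextExpContrib]
          split_ifs <;> simp_all
          omega
        split
        · rename_i hg'; rw [hg'] at hg; exact absurd hg (by simp)
        · rename_i s' hg'
          rw [hg'] at hg
          have hs : s = s' := (Option.some.inj hg).symm
          subst hs
          show nextExpLoopA L (if s = ")" then (if s = "(" then c + 1 else c) - 1 else
            if s = "(" then c + 1 else c) (n + 1) = v
          rw [hcc]
          exact ih _ _ _ (by omega) h
    · rename_i hc
      rw [nextExpLoopA, if_neg hc]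
      exact Option.some.inj h

theorem loopAo_step (L : List String) {c n : Int} {s : String} (hc : 0 < c)
    (hg : PySem.List.pyGet? L n = some s) :
    nextExpLoopAo L c n = nextExpLoopAo L (c + nextExpContrib s) (n + 1) := by
  rw [nextExpLoopAo, if_pos hc]
  split
  · rename_i hg'; rw [hg'] at hg; exact absurd hg (by simp)
  · rename_i s' hg'
    rw [hg'] at hg
    have hs : s = s' := (Option.some.inj hg).symm
    subst hs; rfl

theorem loopAo_none (L : List String) {c n : Int} (hc : 0 < c)
    (hg : PySem.List.pyGet? L n = none) : nextExpLoopAo L c n = none := by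
  rw [nextExpLoopAo, if_pos hc]
  split
  · rfl
  · rename_i s' hg'; rw [hg'] at hg; exact absurd hg (by simp)

theorem loopAo_done (L : List String) {c n : Int} (hc : ¬ 0 < c) :
    nextExpLoopAo L c n = some n := by
  rw [nextExpLoopAo, if_neg hc]

theorem contrib_bnd (s : String) : -1 ≤ nextExpContrib s ∧ nextExpContrib s ≤ 1 := by
  simp only [nextExpContrib]; split_ifs <;> omega

theorem nextExpLoopAo_bounds (L : List String) :
    ∀ (k : Nat) (c n v : Int), ((L.length : Int) - n).toNat ≤ k → 0 < c →
      nextExpLoopAo L c n = some v → n < v ∧ v ≤ (L.length : Int) := by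
  intro k
  induction k with
  | zero =>
    intro c n v hk hc h
    cases hg : PySem.List.pyGet? L n with
    | none => rw [loopAo_none L hc hg] at h; exact absurd h (by simp)
    | some s => have := pyGet?_some_lt L n s hg; omega
  | succ k ih =>
    intro c n v hk hc h
    cases hg : PySem.List.pyGet? L n with
    | none => rw [loopAo_none L hc hg] at h; exact absurd h (by simp)
    | some s =>
      have hlt := pyGet?_some_lt L n s hg
      rw [loopAo_step L hc hg] at h
      by_cases hc' : 0 < c + nextExpContrib s
      · have := ih _ _ _ (by omega) hc' h
        omega
      · rw [loopAo_done L hc'] at h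
        have := Option.some.inj h
        omega

theorem nextExpLoopAo_comp (L : List String) :
    ∀ (k : Nat) (c d n : Int), ((L.length : Int) - n).toNat ≤ k → 0 < c → 0 ≤ d →
      nextExpLoopAo L (c + d) n = (nextExpLoopAo L c n).bind (fun m => nextExpLoopAo L d m) := by
  intro k
  induction k with
  | zero =>
    intro c d n hk hc hd
    cases hg : PySem.List.pyGet? L n with
    | none => rw [loopAo_none L (by omega) hg, loopAo_none L hc hg]; rfl
    | some s => have := pyGet?_some_lt L n s hg; omega
  | succ k ih =>
    intro c d n hk hc hd
    cases hg : PySem.List.pyGet? L n with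
    | none => rw [loopAo_none L (by omega) hg, loopAo_none L hc hg]; rfl
    | some s =>
      have hlt := pyGet?_some_lt L n s hg
      have hcb := contrib_bnd s
      rw [loopAo_step L (by omega : (0:Int) < c + d) hg, loopAo_step L hc hg]
      by_cases hc' : 0 < c + nextExpContrib s
      · have heq : c + d + nextExpContrib s = c + nextExpContrib s + d := by ring
        rw [heq, ih _ _ _ (by omega) hc' hd]
      · have hc0 : c + nextExpContrib s = 0 := by omega
        rw [loopAo_done L hc', Option.bind_some]
        have : c + d + nextExpContrib s = d := by omega
        rw [this]

theorem nextExpLoopAo_of_bal (L : List String) :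
    ∀ (j : Nat) (c n : Int), 0 < c → -(L.length : Int) ≤ n → n + (j : Int) < (L.length : Int) →
      c + nextExpBal L n (j + 1) = 0 → ∃ v, nextExpLoopAo L c n = some v := by
  intro j
  induction j with
  | zero =>
    intro c n hc hlo hhi hb
    obtain ⟨s, hg⟩ : ∃ s, PySem.List.pyGet? L n = some s := by
      cases hgg : PySem.List.pyGet? L n with
      | none =>
        exfalso; rw [PySem.List.pyGet?_eq_none_iff, PySem.Raise.InRange] at hgg
        simp at hhi; omega
      | some s => exact ⟨s, rfl⟩
    have hd : PySem.List.pyGetD L n "" = s := by simp [PySem.List.pyGetD, hg]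
    have hb' : c + nextExpContrib s = 0 := by
      rw [nextExpBal, nextExpBal, hd] at hb; omega
    exact ⟨n + 1, by rw [loopAo_step L hc hg, hb', loopAo_done L (by omega)]⟩
  | succ j ih =>
    intro c n hc hlo hhi hb
    obtain ⟨s, hg⟩ : ∃ s, PySem.List.pyGet? L n = some s := by
      cases hgg : PySem.List.pyGet? L n with
      | none =>
        exfalso; rw [PySem.List.pyGet?_eq_none_iff, PySem.Raise.InRange] at hgg
        push_cast at hhi; omega
      | some s => exact ⟨s, rfl⟩
    have hd : PySem.List.pyGetD L n "" = s := by simp [PySem.List.pyGetD, hg]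
    have hb' : c + nextExpContrib s + nextExpBal L (n + 1) (j + 1) = 0 := by
      rw [nextExpBal, hd] at hb; omega
    by_cases hc' : 0 < c + nextExpContrib s
    · obtain ⟨v, hv⟩ := ih (c + nextExpContrib s) (n + 1) hc' (by omega)
        (by push_cast at hhi ⊢; omega) hb'
      exact ⟨v, by rw [loopAo_step L hc hg]; exact hv⟩
    · exact ⟨n + 1, by rw [loopAo_step L hc hg, loopAo_done L hc']⟩


theorem nextExpLoopB_eq (L : List String) :
    ∀ (k : Nat) (n v : Int) (f : Nat), nextExpLoopAo L 1 n = some v →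
      (v - n).toNat ≤ k → 2 * (v - n).toNat ≤ f → nextExpLoopB L f n = v := by
  intro k
  induction k with
  | zero =>
    intro n v f h hk hf
    have hb := nextExpLoopAo_bounds L ((L.length : Int) - n).toNat 1 n v le_rfl one_pos h
    omega
  | succ k ih =>
    intro n v f h hk hf
    have hb := nextExpLoopAo_bounds L ((L.length : Int) - n).toNat 1 n v le_rfl one_pos h
    obtain ⟨s, hg⟩ : ∃ s, PySem.List.pyGet? L n = some s := by
      cases hgg : PySem.List.pyGet? L n with
      | none => rw [loopAo_none L one_pos hgg] at h; exact absurd h (by simp)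
      | some s => exact ⟨s, rfl⟩
    obtain ⟨f', rfl⟩ : ∃ f', f = Nat.succ f' := by
      cases f with
      | zero => omega
      | succ f' => exact ⟨f', rfl⟩
    rw [loopAo_step L one_pos hg] at h
    by_cases hs : s = ")"
    · have hcs : nextExpContrib s = -1 := by simp [nextExpContrib, hs]
      rw [hcs, show (1 + -1 : Int) = 0 by norm_num, loopAo_done L (by omega)] at h
      have hv : v = n + 1 := (Option.some.inj h).symm
      simp [nextExpLoopB, hg, hs, hv]
    · by_cases hp : s = "("
      · have hcs : nextExpContrib s = 1 := by simp [nextExpContrib, hp]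
        rw [hcs, show (1 + 1 : Int) = 1 + 1 from rfl,
          nextExpLoopAo_comp L ((L.length : Int) - (n + 1)).toNat 1 1 (n + 1) le_rfl one_pos
            (by norm_num)] at h
        cases hm : nextExpLoopAo L 1 (n + 1) with
        | none => rw [hm] at h; exact absurd h (by simp)
        | some m =>
          rw [hm, Option.bind_some] at h
          have hbm := nextExpLoopAo_bounds L ((L.length : Int) - (n + 1)).toNat 1 (n + 1) m
            le_rfl one_pos hm
          have hbv := nextExpLoopAo_bounds L ((L.length : Int) - m).toNat 1 m v
            le_rfl one_pos h
          obtain ⟨f'', rfl⟩ : ∃ f'', f' = Nat.succ f'' := by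
            cases f' with
            | zero => omega
            | succ f'' => exact ⟨f'', rfl⟩
          have hgo : nextExpGoB L (Nat.succ f'') n = nextExpLoopB L f'' (n + 1) := by
            simp [nextExpGoB, hg, hp]
          have h1 : nextExpLoopB L f'' (n + 1) = m := ih (n + 1) m f'' hm (by omega) (by omega)
          have h2 : nextExpLoopB L (Nat.succ f'') m = v := ih m v (Nat.succ f'') h (by omega) (by omega)
          calc nextExpLoopB L (Nat.succ (Nat.succ f'')) n
              = nextExpLoopB L (Nat.succ f'') (nextExpGoB L (Nat.succ f'') n) := by
                simp [nextExpLoopB, hg, hs]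
            _ = v := by rw [hgo, h1]; exact h2
      · have hcs : nextExpContrib s = 0 := by simp [nextExpContrib, hp, hs]
        rw [hcs, add_zero] at h
        have hbv := nextExpLoopAo_bounds L ((L.length : Int) - (n + 1)).toNat 1 (n + 1) v
          le_rfl one_pos h
        obtain ⟨f'', rfl⟩ : ∃ f'', f' = Nat.succ f'' := by
          cases f' with
          | zero => omega
          | succ f'' => exact ⟨f'', rfl⟩
        have hgo : nextExpGoB L (Nat.succ f'') n = n + 1 := by
          simp [nextExpGoB, hg, hp]
        calc nextExpLoopB L (Nat.succ (Nat.succ f'')) n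
            = nextExpLoopB L (Nat.succ f'') (nextExpGoB L (Nat.succ f'') n) := by
              simp [nextExpLoopB, hg, hs]
          _ = v := by rw [hgo]; exact ih (n + 1) v (Nat.succ f'') h (by omega) (by omega)

theorem nextExp_eq_alt (L : List String) (i : Int) (hpre : Pre_nextExp L i) :
    nextExp L i = nextExp_alt L i := by
  obtain ⟨hin, hbal⟩ := hpre
  rw [PySem.Raise.InRange] at hin
  obtain ⟨s, hg⟩ : ∃ s, PySem.List.pyGet? L i = some s := by
    cases hgg : PySem.List.pyGet? L i with
    | none =>
      exfalso; rw [PySem.List.pyGet?_eq_none_iff, PySem.Raise.InRange] at hgg; omega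
    | some s => exact ⟨s, rfl⟩
  have hd : PySem.List.pyGetD L i "" = s := by simp [PySem.List.pyGetD, hg]
  have hF : 2 * L.length + 2 * i.natAbs + 8 = Nat.succ (2 * L.length + 2 * i.natAbs + 7) := rfl
  by_cases hs : s = "("
  · obtain ⟨k, hk, hk1, hk2⟩ := hbal (by rw [hd, hs])
    have hk2' : 1 + nextExpBal L (i + 1) (k + 1) = 0 := by
      rw [nextExpBal_eq L (k + 1) (i + 1)]; omega
    obtain ⟨v, hv⟩ := nextExpLoopAo_of_bal L k 1 (i + 1) one_pos (by omega) (by omega) hk2'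
    have hA : nextExpLoopA L 1 (i + 1) = v :=
      nextExpLoopAo_eq L ((L.length : Int) - (i + 1)).toNat 1 (i + 1) v le_rfl hv
    have hbv := nextExpLoopAo_bounds L ((L.length : Int) - (i + 1)).toNat 1 (i + 1) v
      le_rfl one_pos hv
    have hB : nextExpLoopB L (2 * L.length + 2 * i.natAbs + 7) (i + 1) = v :=
      nextExpLoopB_eq L (v - (i + 1)).toNat (i + 1) v _ hv le_rfl (by omega)
    rw [nextExp, nextExp_alt, hF]
    simp only [nextExpGoB, hg]
    rw [if_pos hs, if_neg (not_not_intro hs), show (0 + 1 : Int) = 1 from by norm_num, hA, hB]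
  · rw [nextExp, nextExp_alt, hF]
    simp only [nextExpGoB, hg]
    rw [if_neg hs, if_pos hs]

-- ===== VERDICT (by name: the statement is the Claim_ definition above) =====
theorem nextExp_spec : Claim_equal_nextExp := by
  intro L i _ hpre
  show nextExp L i = nextExp_alt L i
  exact nextExp_eq_alt L i hpre
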